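-- pv_equiv track=rewrite | github.com/nerdneilsfield/ai-deepresearch-flow | python/deepresearch_flow/paper/web/app.py | _tokenize_filter_query
-- ===== SOURCE A (Python) =====
-- def _tokenize_filter_query(text: str) -> list[str]:
--     out: list[str] = []
--     buf: list[str] = []
--     in_quote = False
--
--     for ch in text:
--         if ch == '"':
--             in_quote = not in_quote
--             continue
--         if not in_quote and ch.isspace():
--             token = "".join(buf).strip()
--             if token:
--                 out.append(token)
--             buf = []
--             continue
--         buf.append(ch)
--
--     token = "".join(buf).strip()
--     if token:
--         out.append(token)
--     return out
-- ===== SOURCE B (Python) =====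
-- def _tokenize_filter_query(text: str) -> list[str]:
--     out: list[str] = []
--     buf = ""
--     for i, seg in enumerate(text.split('"')):
--         if i % 2 == 1:
--             # inside quotes: the whole segment joins the running buffer
--             buf += seg
--             continue
--         if not any(c.isspace() for c in seg):
--             buf += seg
--             continue
--         words = seg.split()
--         first = words[0] if not seg[0].isspace() else ""
--         last = words[-1] if not seg[-1].isspace() else ""
--         token = (buf + first).strip()
--         if token:
--             out.append(token)
--         out.extend(words[(1 if first else 0):(len(words) - (1 if last else 0))])
--         buf = last
--     token = buf.strip()
--     if token:
--         out.append(token)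
--     return out
-- ===== Notes on version B (the rewrite author's own statement) =====
-- stated objective: alternative
-- what changed: B tokenizes by first splitting the text on the double-quote character and processing whole segments (odd-index segments are appended verbatim to the running buffer, even-index segments are word-split with their edge words joining/seeding the buffer), replacing A's character-at-a-time quote/whitespace state machine.
import Mathlib
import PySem

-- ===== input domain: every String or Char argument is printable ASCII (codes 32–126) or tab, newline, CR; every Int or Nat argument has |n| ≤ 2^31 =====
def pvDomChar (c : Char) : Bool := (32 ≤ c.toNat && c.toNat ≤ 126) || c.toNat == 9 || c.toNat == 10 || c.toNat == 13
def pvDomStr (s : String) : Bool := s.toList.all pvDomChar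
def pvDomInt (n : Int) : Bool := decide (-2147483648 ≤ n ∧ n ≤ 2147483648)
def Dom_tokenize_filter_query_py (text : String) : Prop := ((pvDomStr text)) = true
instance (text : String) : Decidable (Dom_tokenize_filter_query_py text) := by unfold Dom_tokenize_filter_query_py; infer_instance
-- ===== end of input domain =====

-- B re-implements the tokenizer by splitting on the double-quote character first and processing whole segments
-- (odd-index segments join the buffer verbatim, even-index segments are word-split),
-- instead of A's character-by-character quote/space state machine; same return value.

-- ===== PORT A =====
-- token = "".join(buf).strip(); if token: out.append(token)  (A's flush, used twice)
def pvFlushA (out : List String) (buf : List Char) : List String :=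
  let t := PySem.Chars.strip buf
  if t.isEmpty then out else out ++ [String.ofList t]

-- the for-loop of A: state (out, buf, in_quote)
def pvTokALoop : List Char → List String × List Char × Bool → List String × List Char × Bool
  | [], st => st
  | c :: rest, (out, buf, q) =>
    if c = '"' then pvTokALoop rest (out, buf, !q)
    else if !q && PySem.Chars.isspace c then pvTokALoop rest (pvFlushA out buf, [], q)
    else pvTokALoop rest (out, buf ++ [c], q)

def tokenize_filter_query_py (text : String) : List String :=
  let st := pvTokALoop text.toList ([], [], false)
  pvFlushA st.1 st.2.1

-- ===== PORT B =====
-- token = (buf + first).strip(); if token: out.append(token)  (B's flush)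
def pvFlushB (out : List String) (buf : List Char) : List String :=
  let t := PySem.Chars.strip buf
  if t.isEmpty then out else out ++ [String.ofList t]

-- one enumerated segment of text.split('"'); seg.split() is ported exactly as
-- "split on whitespace runs, drop empty pieces" (splitOnP by Python's isspace)
def pvStepB (acc : List String × List Char) (iseg : Int × List Char) : List String × List Char :=
  let out := acc.1
  let buf := acc.2
  let i := iseg.1
  let seg := iseg.2
  if PySem.Int.mod i 2 == 1 then (out, buf ++ seg)
  else if !(seg.any PySem.Chars.isspace) then (out, buf ++ seg)
  else
    let words := (List.splitOnP PySem.Chars.isspace seg).filter (fun w => !w.isEmpty)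
    let first := if PySem.Chars.isspace (seg.headD ' ') then [] else words.headD []
    let last := if PySem.Chars.isspace (seg.getLastD ' ') then [] else words.getLastD []
    let out := pvFlushB out (buf ++ first)
    let mid := PySem.List.slice words (some (if first.isEmpty then 0 else 1))
                 (some ((words.length : Int) - (if last.isEmpty then 0 else 1)))
    (out ++ mid.map String.ofList, last)

def tokenize_filter_query_py_alt (text : String) : List String :=
  let segs := List.splitOn '"' text.toList
  let st := (PySem.List.enumerate segs).foldl pvStepB ([], [])
  pvFlushB st.1 st.2

-- ===== PRECONDITION & SPEC =====
def Spec_tokenize_filter_query_py (text : String) (out : List String) : Prop := out = tokenize_filter_query_py_alt text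
instance (text : String) (out : List String) : Decidable (Spec_tokenize_filter_query_py text out) := by unfold Spec_tokenize_filter_query_py; infer_instance

-- ===== CLAIM (what is proved, stated in full; the proofs are below) =====
def Claim_equal_tokenize_filter_query_py : Prop := ∀ (text : String), Dom_tokenize_filter_query_py text → Spec_tokenize_filter_query_py text (tokenize_filter_query_py text)

-- ===== LEMMAS AND PROOFS =====

-- abbreviation used only by the proofs
def pvWS : Char → Bool := PySem.Chars.isspace

-- A's outside-quote loop over one '"'-free segment, expressed on the splitOnP pieces:
-- every piece but the last is flushed (joined onto the buffer), the last stays in the buffer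
def pvOutRun : List (List Char) → List String × List Char → List String × List Char
  | [], st => st
  | [p], (out, buf) => (out, buf ++ p)
  | p :: q :: ps, (out, buf) => pvOutRun (q :: ps) (pvFlushA out (buf ++ p), [])

-- processing one segment at quote-parity q
def pvSegStep (q : Bool) (seg : List Char) (st : List String × List Char) : List String × List Char :=
  if q then (st.1, st.2 ++ seg) else pvOutRun (List.splitOnP pvWS seg) st

-- processing a list of segments, toggling parity between segments
def pvFoldQ : Bool → List (List Char) → List String × List Char → List String × List Char
  | _, [], st => st
  | q, seg :: rest, st => pvFoldQ (!q) rest (pvSegStep q seg st)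

theorem pv_sp_pieces (p : Char → Bool) (l : List Char) :
    ∀ w ∈ List.splitOnP p l, ∀ c ∈ w, p c = false := by
  induction l with
  | nil => simp [List.splitOnP_nil]
  | cons x xs ih =>
    rw [List.splitOnP_cons]
    by_cases hx : p x = true
    · simp only [hx]
      intro w hw
      rcases List.mem_cons.1 hw with h | h
      · simp [h]
      · exact ih w h
    · simp only [hx]
      rw [if_neg (by simp)]
      cases hsp : List.splitOnP p xs with
      | nil => exact absurd hsp (List.splitOnP_ne_nil p xs)
      | cons h t =>
        simp only [List.modifyHead]
        intro w hw
        rcases List.mem_cons.1 hw with hw | hw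
        · subst hw
          intro c hc
          rcases List.mem_cons.1 hc with hc | hc
          · subst hc; simpa using hx
          · exact ih h (by simp [hsp]) c hc
        · exact ih w (by simp [hsp, List.mem_cons, hw])

theorem pv_sp_noP (l : List Char) (h : l.any pvWS = false) :
    List.splitOnP pvWS l = [l] := by
  induction l with
  | nil => simp [List.splitOnP_nil]
  | cons x xs ih =>
    simp only [List.any_cons, Bool.or_eq_false_iff] at h
    rw [List.splitOnP_cons, if_neg (by simp [h.1]), ih h.2]
    rfl

theorem pv_sp_len2 (l : List Char) (h : l.any pvWS = true) :
    2 ≤ (List.splitOnP pvWS l).length := by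
  induction l with
  | nil => simp at h
  | cons x xs ih =>
    rw [List.splitOnP_cons]
    by_cases hx : pvWS x = true
    · rw [if_pos hx]
      cases hsp : List.splitOnP pvWS xs with
      | nil => exact absurd hsp (List.splitOnP_ne_nil pvWS xs)
      | cons a t => simp
    · simp only [List.any_cons, hx, Bool.false_or] at h
      rw [if_neg (by simp [hx])]
      have := ih h
      cases hsp : List.splitOnP pvWS xs with
      | nil => exact absurd hsp (List.splitOnP_ne_nil pvWS xs)
      | cons a t => rw [hsp] at this; simpa using this

theorem pv_sp_head_space (c : Char) (rest : List Char) (h : pvWS c = true) :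
    (List.splitOnP pvWS (c :: rest)).headD [] = [] := by
  rw [List.splitOnP_cons, if_pos h]; rfl

theorem pv_sp_head_nonspace (c : Char) (rest : List Char) (h : pvWS c = false) :
    (List.splitOnP pvWS (c :: rest)).headD [] = c :: (List.splitOnP pvWS rest).headD [] := by
  rw [List.splitOnP_cons, if_neg (by simp [h])]
  cases hsp : List.splitOnP pvWS rest with
  | nil => exact absurd hsp (List.splitOnP_ne_nil pvWS rest)
  | cons a t => rfl

theorem pv_sp_last_space (l : List Char) (c : Char) (h : pvWS c = true) :
    (List.splitOnP pvWS (l ++ [c])).getLastD [] = [] := by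
  induction l with
  | nil => rw [show ([] : List Char) ++ [c] = [c] from rfl, List.splitOnP_cons, if_pos h]; simp [List.splitOnP_nil]
  | cons x xs ih =>
    rw [List.cons_append, List.splitOnP_cons]
    by_cases hx : pvWS x = true
    · rw [if_pos hx]
      cases hsp : List.splitOnP pvWS (xs ++ [c]) with
      | nil => exact absurd hsp (List.splitOnP_ne_nil pvWS _)
      | cons a t => rw [hsp] at ih; simpa using ih
    · rw [if_neg (by simp [hx])]
      have h2 : 2 ≤ (List.splitOnP pvWS (xs ++ [c])).length := pv_sp_len2 _ (by simp [h])
      cases hsp : List.splitOnP pvWS (xs ++ [c]) with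
      | nil => exact absurd hsp (List.splitOnP_ne_nil pvWS _)
      | cons a t =>
        rw [hsp] at ih h2
        cases t with
        | nil => simp at h2
        | cons b t' => simpa using ih

theorem pv_sp_last_nonspace (l : List Char) (c : Char) (h : pvWS c = false) :
    (List.splitOnP pvWS (l ++ [c])).getLastD [] = (List.splitOnP pvWS l).getLastD [] ++ [c] := by
  induction l with
  | nil =>
    rw [show ([] : List Char) ++ [c] = [c] from rfl, List.splitOnP_cons, if_neg (by simp [h])]
    simp [List.splitOnP_nil]
  | cons x xs ih =>
    rw [List.cons_append, List.splitOnP_cons, List.splitOnP_cons]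
    by_cases hx : pvWS x = true
    · rw [if_pos hx, if_pos hx]
      cases hsp : List.splitOnP pvWS (xs ++ [c]) with
      | nil => exact absurd hsp (List.splitOnP_ne_nil pvWS _)
      | cons a t =>
        cases hsp2 : List.splitOnP pvWS xs with
        | nil => exact absurd hsp2 (List.splitOnP_ne_nil pvWS _)
        | cons a2 t2 => rw [hsp] at ih; rw [hsp2] at ih; simpa using ih
    · rw [if_neg (by simp [hx]), if_neg (by simp [hx])]
      by_cases hxs : xs.any pvWS = true
      · have h2 : 2 ≤ (List.splitOnP pvWS (xs ++ [c])).length := pv_sp_len2 _ (by simp [hxs])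
        have h3 : 2 ≤ (List.splitOnP pvWS xs).length := pv_sp_len2 _ hxs
        cases hsp : List.splitOnP pvWS (xs ++ [c]) with
        | nil => exact absurd hsp (List.splitOnP_ne_nil pvWS _)
        | cons a t =>
          cases hsp2 : List.splitOnP pvWS xs with
          | nil => exact absurd hsp2 (List.splitOnP_ne_nil pvWS _)
          | cons a2 t2 =>
            rw [hsp] at ih h2
            rw [hsp2] at ih h3
            cases t with
            | nil => simp at h2
            | cons b t' =>
              cases t2 with
              | nil => simp at h3
              | cons b2 t2' => simpa using ih
      · have hxs' : xs.any pvWS = false := by simpa using hxs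
        rw [pv_sp_noP xs hxs', pv_sp_noP (xs ++ [c]) (by simp [hxs', h])]
        simp

theorem pv_dropWhile_noP (m : List Char) (hm : ∀ c ∈ m, pvWS c = false) :
    List.dropWhile PySem.Chars.isspace m = m := by
  cases m with
  | nil => rfl
  | cons a t =>
    rw [List.dropWhile_cons, if_neg]
    simpa [pvWS] using hm a (by simp)

theorem pv_strip_noP (l : List Char) (h : ∀ c ∈ l, pvWS c = false) :
    PySem.Chars.strip l = l := by
  unfold PySem.Chars.strip PySem.Chars.lstrip PySem.Chars.rstrip
  rw [pv_dropWhile_noP l h, pv_dropWhile_noP _ (by intro c hc; exact h c (by simpa using hc)), List.reverse_reverse]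

-- flush of a whitespace-free piece
theorem pv_flush_piece (out : List String) (p : List Char) (h : ∀ c ∈ p, pvWS c = false) :
    pvFlushA out p = out ++ (if p.isEmpty then [] else [String.ofList p]) := by
  unfold pvFlushA
  rw [pv_strip_noP p h]
  cases p <;> simp

theorem pv_outRun_closed : ∀ (ps : List (List Char)) (out : List String) (buf : List Char),
    2 ≤ ps.length → (∀ w ∈ ps, ∀ c ∈ w, pvWS c = false) →
    pvOutRun ps (out, buf) =
      (pvFlushA out (buf ++ ps.headD []) ++
         (((ps.drop 1).dropLast.filter (fun w => !w.isEmpty)).map String.ofList),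
       ps.getLastD [])
  | [], _, _, h, _ => by simp at h
  | [p], _, _, h, _ => by simp at h
  | p0 :: p1 :: rest, out, buf, _, hw => by
    cases rest with
    | nil => simp [pvOutRun]
    | cons r rs =>
      rw [show pvOutRun (p0 :: p1 :: r :: rs) (out, buf) = pvOutRun (p1 :: r :: rs) (pvFlushA out (buf ++ p0), []) from rfl]
      rw [pv_outRun_closed (p1 :: r :: rs) _ [] (by simp) (fun w hwm => hw w (by simp [List.mem_cons] at hwm ⊢; tauto))]
      have hp1 : ∀ c ∈ p1, pvWS c = false := hw p1 (by simp)
      rw [show ([] : List Char) ++ (p1 :: r :: rs).headD [] = p1 by simp]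
      rw [pv_flush_piece _ p1 hp1]
      simp only [List.drop_one, List.tail_cons, List.dropLast_cons_of_ne_nil (by simp : r :: rs ≠ []),
        List.filter_cons, List.getLastD_cons]
      cases hp : p1.isEmpty <;> simp_all

theorem pv_loop_append (a b : List Char) (st : List String × List Char × Bool) :
    pvTokALoop (a ++ b) st = pvTokALoop b (pvTokALoop a st) := by
  induction a generalizing st with
  | nil => rfl
  | cons c rest ih =>
    obtain ⟨out, buf, q⟩ := st
    simp only [List.cons_append, pvTokALoop]
    split_ifs <;> exact ih _

theorem pv_loop_inside (seg : List Char) (h : ∀ c ∈ seg, ¬ c = '"') :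
    ∀ out buf, pvTokALoop seg (out, buf, true) = (out, buf ++ seg, true) := by
  induction seg with
  | nil => simp [pvTokALoop]
  | cons c rest ih =>
    intro out buf
    have hc : ¬ c = '"' := h c (by simp)
    simp only [pvTokALoop, if_neg hc]
    rw [show (!true && PySem.Chars.isspace c) = false by simp, if_neg (by simp)]
    rw [ih (fun c hc => h c (by simp [hc])) out (buf ++ [c])]
    simp

theorem pv_loop_outside (seg : List Char) (h : ∀ c ∈ seg, ¬ c = '"') :
    ∀ out buf, pvTokALoop seg (out, buf, false) =
      ((pvOutRun (List.splitOnP pvWS seg) (out, buf)).1,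
       (pvOutRun (List.splitOnP pvWS seg) (out, buf)).2, false) := by
  induction seg with
  | nil => simp [pvTokALoop, List.splitOnP_nil, pvOutRun]
  | cons c rest ih =>
    intro out buf
    have hc : ¬ c = '"' := h c (by simp)
    have hrest : ∀ c ∈ rest, ¬ c = '"' := fun c hc => h c (by simp [hc])
    rw [List.splitOnP_cons]
    by_cases hsp : pvWS c = true
    · simp only [pvTokALoop, if_neg hc]
      rw [show (!false && PySem.Chars.isspace c) = true by simpa [pvWS] using hsp, if_pos rfl]
      rw [show (pvWS c = true) from hsp, if_pos rfl]
      cases hspr : List.splitOnP pvWS rest with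
      | nil => exact absurd hspr (List.splitOnP_ne_nil pvWS rest)
      | cons a t =>
        rw [ih hrest (pvFlushA out buf) []]
        simp [pvOutRun, hspr]
    · simp only [pvTokALoop, if_neg hc]
      rw [show (!false && PySem.Chars.isspace c) = false by simpa [pvWS] using hsp,
          if_neg (by simp)]
      rw [if_neg hsp]
      cases hspr : List.splitOnP pvWS rest with
      | nil => exact absurd hspr (List.splitOnP_ne_nil pvWS rest)
      | cons a t =>
        rw [ih hrest out (buf ++ [c]), hspr]
        cases t with
        | nil => simp [pvOutRun]
        | cons b t' => simp [pvOutRun]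

theorem pv_seg_state (seg : List Char) (h : ∀ c ∈ seg, ¬ c = '"') (q : Bool) (out : List String) (buf : List Char) :
    pvTokALoop seg (out, buf, q) = ((pvSegStep q seg (out, buf)).1, (pvSegStep q seg (out, buf)).2, q) := by
  cases q with
  | true => rw [pv_loop_inside seg h out buf]; simp [pvSegStep]
  | false => rw [pv_loop_outside seg h out buf]; simp [pvSegStep]

theorem pv_main (segs : List (List Char)) :
    ∀ q out buf, (∀ seg ∈ segs, ∀ c ∈ seg, ¬ c = '"') →
      ((pvTokALoop (List.intercalate ['"'] segs) (out, buf, q)).1,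
       (pvTokALoop (List.intercalate ['"'] segs) (out, buf, q)).2.1) =
      pvFoldQ q segs (out, buf) := by
  induction segs with
  | nil => intro q out buf _; simp [List.intercalate, pvTokALoop, pvFoldQ]
  | cons seg rest ih =>
    intro q out buf h
    have hseg : ∀ c ∈ seg, ¬ c = '"' := h seg (by simp)
    have hrest : ∀ s ∈ rest, ∀ c ∈ s, ¬ c = '"' := fun s hs => h s (by simp [hs])
    cases rest with
    | nil =>
      rw [show List.intercalate ['"'] [seg] = seg by simp [List.intercalate]]
      rw [pv_seg_state seg hseg q out buf]
      simp [pvFoldQ]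
    | cons r rs =>
      rw [show List.intercalate ['"'] (seg :: r :: rs) = seg ++ '"' :: List.intercalate ['"'] (r :: rs) by
        simp [List.intercalate]]
      rw [pv_loop_append, pv_seg_state seg hseg q out buf]
      rw [show ('"' :: List.intercalate ['"'] (r :: rs)) = ['"'] ++ List.intercalate ['"'] (r :: rs) from rfl]
      rw [pv_loop_append]
      rw [show pvTokALoop ['"'] ((pvSegStep q seg (out, buf)).1, (pvSegStep q seg (out, buf)).2, q)
            = ((pvSegStep q seg (out, buf)).1, (pvSegStep q seg (out, buf)).2, !q) by simp [pvTokALoop]]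
      rw [ih (!q) _ _ hrest]
      simp [pvFoldQ]

-- decomposition of a length-≥2 list
theorem pv_decomp (ps : List (List Char)) (h : 2 ≤ ps.length) :
    ps = ps.headD [] :: ((ps.drop 1).dropLast ++ [ps.getLastD []]) := by
  cases ps with
  | nil => simp at h
  | cons a t =>
    cases t with
    | nil => simp at h
    | cons b t' =>
      simp only [List.headD_cons, List.drop_one, List.tail_cons, List.getLastD_cons]
      have := List.dropLast_concat_getLast (l := b :: t') (by simp)
      rw [List.getLast_eq_getLastD] at this
      simp only [List.cons.injEq, true_and]
      simpa using this.symm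

theorem pv_fmod_two (k : Nat) : (PySem.Int.mod (k : Int) 2 == 1) = (k % 2 == 1) := by
  unfold PySem.Int.mod
  rw [Int.fmod_eq_emod, if_pos (Or.inl (by norm_num)), add_zero]
  rw [Bool.eq_iff_iff]
  simp only [beq_iff_eq]
  omega

theorem pv_filter_concat_ne (A : List (List Char)) (x : List Char) (hx : x ≠ []) :
    (A ++ [x]).filter (fun w => !w.isEmpty) = A.filter (fun w => !w.isEmpty) ++ [x] := by
  rw [List.filter_append, List.filter_cons, if_pos (by simpa using hx)]
  rfl

theorem pv_stepB_eq (k : Nat) (seg : List Char) (st : List String × List Char) :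
    pvStepB st ((k : Int), seg) = pvSegStep (k % 2 == 1) seg st := by
  obtain ⟨out, buf⟩ := st
  unfold pvStepB pvSegStep
  dsimp only
  rw [pv_fmod_two]
  simp only [show PySem.Chars.isspace = pvWS from rfl]
  by_cases hq : (k % 2 == 1) = true
  · rw [hq]; simp
  · rw [Bool.not_eq_true] at hq
    rw [hq]
    simp only [Bool.false_eq_true, if_false]
    by_cases hany : seg.any pvWS = true
    · -- whitespace present: compare the words-based step with pvOutRun's closed form
      rw [show (!(seg.any pvWS)) = false by simp [hany], if_neg (by simp)]
      have h2 : 2 ≤ (List.splitOnP pvWS seg).length := pv_sp_len2 seg hany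
      have hw : ∀ w ∈ List.splitOnP pvWS seg, ∀ c ∈ w, pvWS c = false := pv_sp_pieces pvWS seg
      rw [pv_outRun_closed _ out buf h2 hw]
      set ps := List.splitOnP pvWS seg with hps
      set hd := ps.headD [] with hhd
      set lst := ps.getLastD [] with hlst
      set I := (ps.drop 1).dropLast with hI
      have hdecomp : ps = hd :: (I ++ [lst]) := pv_decomp ps h2
      have hne : seg ≠ [] := by
        intro hnil; rw [hnil] at hany; simp at hany
      obtain ⟨c, rest, hcr⟩ : ∃ c rest, seg = c :: rest := by
        cases seg with
        | nil => exact absurd rfl hne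
        | cons c rest => exact ⟨c, rest, rfl⟩
      have hhead : seg.headD ' ' = c := by rw [hcr]; rfl
      obtain ⟨l, d, hld⟩ : ∃ l d, seg = l ++ [d] := by
        refine ⟨seg.dropLast, seg.getLast hne, ?_⟩
        exact (List.dropLast_concat_getLast hne).symm
      have hlastc : seg.getLastD ' ' = d := by rw [hld, List.getLastD_concat]
      -- FIRST equals the head piece
      have hfirst : (if pvWS (seg.headD ' ') = true then ([] : List Char)
            else (ps.filter (fun w => !w.isEmpty)).headD []) = hd := by
        rw [hhead]
        by_cases hc : pvWS c = true
        · rw [if_pos hc]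
          rw [hhd, hps, hcr]
          exact (pv_sp_head_space c rest hc).symm
        · rw [if_neg hc]
          have hdc : hd = c :: (List.splitOnP pvWS rest).headD [] := by
            rw [hhd, hps, hcr]
            exact pv_sp_head_nonspace c rest (by simpa using hc)
          have hdne : hd ≠ [] := by rw [hdc]; simp
          rw [hdecomp, List.filter_cons, if_pos (by simpa using hdne)]
          rfl
      -- LAST equals the last piece
      have hlast : (if pvWS (seg.getLastD ' ') = true then ([] : List Char)
            else (ps.filter (fun w => !w.isEmpty)).getLastD []) = lst := by
        rw [hlastc]
        by_cases hdp : pvWS d = true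
        · rw [if_pos hdp]
          rw [hlst, hps, hld]
          exact (pv_sp_last_space l d hdp).symm
        · rw [if_neg hdp]
          have hlc : lst = (List.splitOnP pvWS l).getLastD [] ++ [d] := by
            rw [hlst, hps, hld]
            exact pv_sp_last_nonspace l d (by simpa using hdp)
          have hlne : lst ≠ [] := by rw [hlc]; simp
          rw [hdecomp, show hd :: (I ++ [lst]) = (hd :: I) ++ [lst] from rfl,
              pv_filter_concat_ne (hd :: I) lst hlne, List.getLastD_concat]
      rw [hfirst, hlast]
      -- the flush agrees (pvFlushB and pvFlushA are the same flush)
      have hflush : pvFlushB out (buf ++ hd) = pvFlushA out (buf ++ hd) := rfl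
      rw [hflush]
      -- MID equals the filtered interior pieces
      have hd_split : ps.filter (fun w => !w.isEmpty) =
          (hd :: I ++ [lst]).filter (fun w => !w.isEmpty) := congrArg _ hdecomp
      set F1 : List (List Char) := if hd.isEmpty then [] else [hd] with hF1
      set FM : List (List Char) := I.filter (fun w => !w.isEmpty) with hFM
      set F2 : List (List Char) := if lst.isEmpty then [] else [lst] with hF2
      have hwords : ps.filter (fun w => !w.isEmpty) = F1 ++ (FM ++ F2) := by
        rw [hd_split]
        simp only [List.cons_append, List.filter_cons, List.filter_append]
        cases hhe : hd.isEmpty <;> cases hle : lst.isEmpty <;>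
          simp [hF1, hFM, hF2, hhe, hle]
      have ha : (if hd.isEmpty then (0 : Int) else 1) = ((F1.length : Nat) : Int) := by
        cases hhe : hd.isEmpty <;> simp [hF1, hhe]
      have hk : (if lst.isEmpty then (0 : Int) else 1) = ((F2.length : Nat) : Int) := by
        cases hle : lst.isEmpty <;> simp [hF2, hle]
      have hmid : PySem.List.slice (ps.filter (fun w => !w.isEmpty))
            (some (if hd.isEmpty then (0 : Int) else 1))
            (some (((ps.filter (fun w => !w.isEmpty)).length : Int) -
              (if lst.isEmpty then (0 : Int) else 1))) = FM := by
        rw [hwords, ha, hk]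
        have hlen : ((F1 ++ (FM ++ F2)).length : Int) - ((F2.length : Nat) : Int)
            = (((F1.length + FM.length : Nat)) : Int) := by
          simp only [List.length_append]
          push_cast
          ring
        rw [hlen, PySem.List.slice_natCast]
        rw [show F1.length + FM.length - F1.length = FM.length by omega]
        rw [List.drop_left' rfl]
        rw [List.take_left' rfl]
      rw [hmid]
    · rw [show (!(seg.any pvWS)) = true by simp [hany], if_pos rfl]
      rw [show List.splitOnP pvWS seg = [seg] from pv_sp_noP seg (by simpa using hany)]
      rfl

theorem pv_enum_fold (segs : List (List Char)) :
    ∀ (k : Nat) st, (PySem.List.enumerate segs (k : Int)).foldl pvStepB st =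
      pvFoldQ (k % 2 == 1) segs st := by
  induction segs with
  | nil => intro k st; simp [PySem.List.enumerate, pvFoldQ]
  | cons seg rest ih =>
    intro k st
    rw [show PySem.List.enumerate (seg :: rest) (k : Int)
          = ((k : Int), seg) :: PySem.List.enumerate rest ((k : Int) + 1) by
      simp [PySem.List.enumerate]]
    rw [List.foldl_cons, pv_stepB_eq k seg st]
    rw [show ((k : Int) + 1) = (((k + 1 : Nat)) : Int) by push_cast; ring]
    rw [ih (k + 1) _]
    rw [show ((k + 1) % 2 == 1) = !(k % 2 == 1) by
      rcases Nat.mod_two_eq_zero_or_one k with h | h <;> simp [Nat.add_mod, h]]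
    rfl

-- ===== VERDICT (by name: the statement is the Claim_ definition above) =====
theorem tokenize_filter_query_py_spec : Claim_equal_tokenize_filter_query_py := by
  intro text _
  unfold Spec_tokenize_filter_query_py tokenize_filter_query_py tokenize_filter_query_py_alt
  dsimp only
  set cs := text.toList with hcs
  have hsplit : List.splitOn '"' cs = List.splitOnP (· == '"') cs := by simp [List.splitOn]
  set segs := List.splitOn '"' cs with hsegs
  have hnq : ∀ seg ∈ segs, ∀ c ∈ seg, ¬ c = '"' := by
    intro seg hseg c hc hcq
    have := pv_sp_pieces (· == '"') cs seg (by rw [← hsplit]; exact hseg) c hc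
    simp [hcq] at this
  have hinter : List.intercalate ['"'] segs = cs := List.intercalate_splitOn cs '"'
  have hA := pv_main segs false [] [] hnq
  rw [hinter] at hA
  have hB : (PySem.List.enumerate segs).foldl pvStepB ([], []) = pvFoldQ false segs ([], []) := by
    have := pv_enum_fold segs 0 ([], [])
    simpa using this
  rw [hB]
  have h1 : (pvTokALoop cs ([], [], false)).1 = (pvFoldQ false segs ([], [])).1 := by
    rw [← hA]
  have h2 : (pvTokALoop cs ([], [], false)).2.1 = (pvFoldQ false segs ([], [])).2 := by
    rw [← hA]
  rw [h1, h2]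
  rfl
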